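-- pv_equiv track=rewrite | github.com/lamertoxa/python_learn | sprint2/task01.py | double_string
-- ===== SOURCE A (Python) =====
-- def double_string(data):
--     data_set = set(data)
--     counter = 0
--     for i in range(0,len(data)):
--         for j in data_set:
--
--             if data[i] + j in data:
--                 counter +=1
--
--     return counter
-- ===== SOURCE B (Python) =====
-- def double_string(data):
--     # one pass: distinct adjacent pairs, then per-char distinct-follower counts
--     pairs = set(zip(data, data[1:]))
--     follows = {}
--     for a, b in pairs:
--         follows[a] = follows.get(a, 0) + 1
--     counter = 0
--     for c in data:
--         counter += follows.get(c, 0)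
--     return counter
-- ===== Notes on version B (the rewrite author's own statement) =====
-- stated objective: faster
-- what changed: Replaces the per-position scan over all distinct characters with a substring search each time by a single precomputed set of adjacent character pairs and a per-character distinct-follower count, then one pass summing those counts.
import Mathlib
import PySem

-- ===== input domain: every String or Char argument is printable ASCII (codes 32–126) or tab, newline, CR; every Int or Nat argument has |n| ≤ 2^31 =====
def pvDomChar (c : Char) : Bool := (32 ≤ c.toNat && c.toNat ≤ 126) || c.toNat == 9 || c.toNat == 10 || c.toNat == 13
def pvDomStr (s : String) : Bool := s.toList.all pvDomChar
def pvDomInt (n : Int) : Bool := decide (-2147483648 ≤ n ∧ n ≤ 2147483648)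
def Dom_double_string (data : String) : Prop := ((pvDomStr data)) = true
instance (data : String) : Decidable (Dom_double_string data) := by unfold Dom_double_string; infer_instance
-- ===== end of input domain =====

-- B replaces A's quadratic scan (each position × each distinct char, substring test each time)
-- by one precomputed set of adjacent pairs and per-char distinct-follower counts: asymptotically faster.

-- ===== PORT A =====
-- data[i] never raises here (i ranges over 0..len-1), so pyGetD's default ' ' is unreachable.
def double_string (data : String) : Int :=
  let l := data.toList
  let dataSet : PySem.Set Char := PySem.Set.ofList l
  (PySem.List.pyRange 0 (PySem.List.len l) 1).foldl
    (fun counter i =>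
      dataSet.foldl
        (fun counter j =>
          if PySem.Chars.isIn [PySem.List.pyGetD l i ' ', j] l then counter + 1 else counter)
        counter)
    0

-- ===== PORT B =====
def double_string_alt (data : String) : Int :=
  let l := data.toList
  let pairs : PySem.Set (Char × Char) :=
    PySem.Set.ofList (l.zip (PySem.List.slice l (some 1) none))
  let follows : PySem.Dict Char Int :=
    pairs.foldl (fun d p => d.insert p.1 (d.getD p.1 0 + 1)) PySem.Dict.empty
  l.foldl (fun counter c => counter + follows.getD c 0) 0

-- ===== PRECONDITION & SPEC =====
def Spec_double_string (data : String) (out : Int) : Prop := out = double_string_alt data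
instance (data : String) (out : Int) : Decidable (Spec_double_string data out) := by unfold Spec_double_string; infer_instance

-- ===== CLAIM (what is proved, stated in full; the proofs are below) =====
def Claim_equal_double_string : Prop := ∀ (data : String), Dom_double_string data → Spec_double_string data (double_string data)

-- ===== LEMMAS AND PROOFS =====

-- a 2-char string is a substring exactly when it is an adjacent pair
theorem pv_infix_pair_iff_mem_zip (l : List Char) (c j : Char) :
    [c, j] <:+: l ↔ (c, j) ∈ l.zip l.tail := by
  induction l with
  | nil => simp
  | cons a t ih =>
    cases t with
    | nil => simp [List.infix_cons_iff, List.IsPrefix]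
    | cons b t2 =>
      rw [List.infix_cons_iff, ih]
      constructor
      · rintro (h | h)
        · rcases (List.cons_prefix_cons.mp h) with ⟨rfl, h2⟩
          rcases (List.cons_prefix_cons.mp h2) with ⟨rfl, _⟩
          simp [List.zip]
        · simp only [List.tail_cons] at h ⊢
          simp [List.zip] at h ⊢
          tauto
      · intro h
        simp only [List.tail_cons] at h ⊢
        simp [List.zip] at h ⊢
        rcases h with ⟨rfl, rfl⟩ | h
        · left; exact ⟨rfl, rfl⟩
        · right; tauto

theorem pv_snd_mem_of_mem_zip (l : List Char) (c j : Char)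
    (h : (c, j) ∈ l.zip l.tail) : j ∈ l :=
  List.mem_of_mem_tail (List.of_mem_zip h).2

-- the per-character counts agree
theorem pv_count_eq (l : List Char) (c : Char) :
    (PySem.Set.ofList l).countP (fun j => PySem.Chars.isIn [c, j] l) =
    (PySem.Set.ofList (l.zip l.tail)).countP (fun p => p.1 == c) := by
  rw [List.countP_eq_length_filter, List.countP_eq_length_filter]
  have hinj : Function.Injective (fun j : Char => (c, j)) := by
    intro x y h; simpa using h
  have hperm :
      (((PySem.Set.ofList l).filter (fun j => PySem.Chars.isIn [c, j] l)).map
        (fun j => (c, j))).Perm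
      ((PySem.Set.ofList (l.zip l.tail)).filter (fun p => p.1 == c)) := by
    have hn1 : (((PySem.Set.ofList l).filter (fun j => PySem.Chars.isIn [c, j] l)).map
        (fun j => (c, j))).Nodup :=
      ((PySem.Set.nodup_ofList l).filter _).map hinj
    have hn2 : ((PySem.Set.ofList (l.zip l.tail)).filter (fun p => p.1 == c)).Nodup :=
      (PySem.Set.nodup_ofList _).filter _
    refine (List.perm_ext_iff_of_nodup hn1 hn2).mpr ?_
    intro p
    simp only [List.mem_map, List.mem_filter, PySem.Set.mem_ofList]
    constructor
    · rintro ⟨j, ⟨hjl, hsub⟩, rfl⟩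
      have := (pv_infix_pair_iff_mem_zip l c j).mp ((PySem.Chars.isIn_iff_infix _ _).mp hsub)
      exact ⟨this, by simp⟩
    · rintro ⟨hmem, hc⟩
      obtain ⟨p1, p2⟩ := p
      have hc' : p1 = c := by simpa using hc
      subst hc'
      refine ⟨p2, ⟨pv_snd_mem_of_mem_zip l p1 p2 hmem, ?_⟩, rfl⟩
      exact (PySem.Chars.isIn_iff_infix _ _).mpr ((pv_infix_pair_iff_mem_zip l p1 p2).mpr hmem)
  calc ((PySem.Set.ofList l).filter (fun j => PySem.Chars.isIn [c, j] l)).length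
      = (((PySem.Set.ofList l).filter (fun j => PySem.Chars.isIn [c, j] l)).map
          (fun j => (c, j))).length := (List.length_map _).symm
    _ = _ := hperm.length_eq

-- ===== VERDICT (by name: the statement is the Claim_ definition above) =====
theorem double_string_spec : Claim_equal_double_string := by
  intro data _
  unfold Spec_double_string double_string double_string_alt
  set l := data.toList with hl
  simp only []
  rw [PySem.List.slice_from_one]
  rw [PySem.List.foldl_pyRange_zero_pyGetD
    (f := fun acc c => (PySem.Set.ofList l).foldl
      (fun counter j => if PySem.Chars.isIn [c, j] l then counter + 1 else counter) acc)]
  simp only [PySem.List.foldl_if_add_one]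
  rw [PySem.List.foldl_add]
  rw [← List.foldl_map (f := fun p : Char × Char => p.1)
      (g := fun d x => PySem.Dict.insert d x (PySem.Dict.getD d x 0 + 1))]
  rw [PySem.Dict.foldl_insert_getD_add_one_eq_counter]
  simp only [PySem.Dict.getD_counter]
  rw [PySem.List.foldl_add]
  congr 1
  congr 1
  apply List.map_congr_left
  intro c _
  rw [pv_count_eq l c]
  congr 1
  simp [List.count, List.countP_map]
  rfl
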